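"""CPython-vs-PySem differential harness: builds one Lean file of '#eval'
lines over a grid of edge inputs per primitive, runs it once against a
compiled PySem.olean, and compares every printed value with what CPython's
built-in returns (an exception on the Python side must meet 'none').
usage: python pv_equiv_pysem_harness.py <dir containing PySem.olean> [lean]
Prints 'SUMMARY <n> cases, <m> evaluated, <k> mismatches; lean rc=<rc>'."""

import ast
import bisect
import itertools
import os
import random
import subprocess
import sys
from collections import Counter


def leanstr(s: str) -> str:
    """A Lean string literal for s."""
    out = '"'
    for ch in s:
        o = ord(ch)
        if ch == '"':
            out += '\\"'
        elif ch == "\\":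
            out += "\\\\"
        elif ch == "\n":
            out += "\\n"
        elif ch == "\t":
            out += "\\t"
        elif ch == "\r":
            out += "\\r"
        elif o < 32 or o == 127:
            out += "\\x%02x" % o
        elif o > 126:
            out += ("\\u%04x" % o) if o < 0x10000 else ch
        else:
            out += ch
    return out + '"'


def lint(xs: list[int]) -> str:
    return "([" + ", ".join(str(x) for x in xs) + "] : List Int)"


def oint(v: int | None) -> str:
    return "none" if v is None else f"(some ({v}))"


def pyint(s: str) -> int | None:
    if any(ord(c) > 127 for c in s):
        return None  # outside the stated (ASCII) domain: PySem.Int.ofStr? declines by design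
    try:
        return int(s)
    except ValueError:
        return None


def getitem(xs, i):
    try:
        return xs[i]
    except IndexError:
        return None


def setitem(xs: list[int], i: int, v: int) -> list[int] | None:
    ys = list(xs)
    try:
        ys[i] = v
    except IndexError:
        return None
    return ys


def inserted(xs: list[int], i: int, v: int) -> list[int]:
    ys = list(xs)
    ys.insert(i, v)
    return ys


def popped(xs: list[int], i: int) -> list[int] | None:
    ys = list(xs)
    try:
        v = ys.pop(i)
    except IndexError:
        return None
    return [v, *ys]


def removed(xs: list[int], v: int) -> list[int] | None:
    ys = list(xs)
    if v not in ys: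
        return None
    ys.remove(v)
    return ys


def build_cases() -> list[tuple[str, str, object]]:
    rnd = random.Random(20260823)
    cases: list[tuple[str, str, object]] = []
    # ---- Int
    avals = list(range(-9, 10)) + [rnd.randrange(-(10**6), 10**6) for _ in range(40)]
    for a in avals:
        for b in list(range(-4, 5)) + [rnd.randrange(-50, 50) for _ in range(5)]:
            cases.append(
                (f"PySem.Int.floordiv? ({a}) ({b})", "oint", None if b == 0 else a // b)
            )
            cases.append(
                (f"PySem.Int.mod? ({a}) ({b})", "oint", None if b == 0 else a % b)
            )
            if b != 0:
                cases.append((f"PySem.Int.truncdiv ({a}) ({b})", "int", int(a / b)))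
                cases.append(
                    (
                        f"(PySem.Int.divmod? ({a}) ({b})).map (fun p => [p.1, p.2])",
                        "olint",
                        list(divmod(a, b)),
                    )
                )
    for s in [
        " 12 ",
        "+5",
        "-0",
        "1_000",
        "_1",
        "1__0",
        "12_",
        "",
        " ",
        "\u0663",
        "0x10",
        "1 2",
        "\x1c5",
        "\t-3\n",
        "007",
        "-",
        "+",
        " +42",
        "4_2_0",
        "0",
        "-000",
        "12\x0b",
        "\x0c7",
        "1_",
        "\uff19",
        "\u00b3",
        "+-1",
        "- 1",
        "1e3",
        "12.0",
    ]:
        cases.append((f"PySem.Int.ofStr? {leanstr(s)}", "oint", pyint(s)))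
    for n in [0, 7, -7, 10**20, -12345]:
        cases.append(
            (
                f"(PySem.Int.toStr ({n})).toList.map Char.toNat",
                "lnat",
                [ord(c) for c in str(n)],
            )
        )
    for n in [*range(-17, 18), 255, 256, -1023, 10**18 + 3, -(2**40)]:
        cases.append(
            (
                f"(PySem.Int.toBinChars ({n})).map Char.toNat",
                "lnat",
                [ord(c) for c in format(n, "b")],
            )
        )
        cases.append(
            (
                f"(PySem.Int.pyBin ({n})).toList.map Char.toNat",
                "lnat",
                [ord(c) for c in bin(n)],
            )
        )
    for s in ["", "7", "42", "-42", "+42", "abc", "-", "+", "--1", "0012", "١٢"]: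
        for w in [-1, 0, 1, 2, 3, 5, 8]:
            cases.append(
                (
                    f"(PySem.Str.zfill {leanstr(s)} ({w})).toList.map Char.toNat",
                    "lnat",
                    [ord(c) for c in s.zfill(w)],
                )
            )
    # ---- List
    lists: list[list[int]] = [
        [],
        [5],
        [1, 2],
        [3, 1, 2],
        [4, 4, 1, 4],
        [9, -2, 7, 7, 0, 3],
    ]
    bounds: list[int | None] = [None, -7, -3, -1, 0, 1, 2, 4, 7]
    for xs in lists:
        for i in range(-8, 9):
            cases.append(
                (f"PySem.List.pyGet? {lint(xs)} ({i})", "oint", getitem(xs, i))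
            )
            cases.append(
                (f"PySem.List.pySet? {lint(xs)} ({i}) 99", "olint", setitem(xs, i, 99))
            )
            cases.append(
                (f"PySem.List.insert {lint(xs)} ({i}) 99", "lint", inserted(xs, i, 99))
            )
            cases.append(
                (
                    f"(PySem.List.pop? {lint(xs)} ({i})).map (fun p => p.1 :: p.2)",
                    "olint",
                    popped(xs, i),
                )
            )
        for st in bounds:
            for sp in bounds:
                for step in [-3, -2, -1, 1, 2, 3]:
                    cases.append(
                        (
                            f"PySem.List.slice? {lint(xs)} {oint(st)} {oint(sp)} ({step})",
                            "olint",
                            xs[slice(st, sp, step)],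
                        )
                    )
                cases.append(
                    (
                        f"PySem.List.slice {lint(xs)} {oint(st)} {oint(sp)}",
                        "lint",
                        xs[slice(st, sp)],
                    )
                )
        cases.append((f"PySem.List.slice? {lint(xs)} none none 0", "olint", None))
        for v in [4, 7, 1, 100]:
            cases.append(
                (
                    f"PySem.List.index? {lint(xs)} ({v})",
                    "onat",
                    xs.index(v) if v in xs else None,
                )
            )
            cases.append((f"PySem.List.count {lint(xs)} ({v})", "int", xs.count(v)))
            cases.append(
                (f"PySem.List.remove? {lint(xs)} ({v})", "olint", removed(xs, v))
            )
        cases.append((f"PySem.List.sorted {lint(xs)} (fun x => x)", "lint", sorted(xs)))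
        cases.append(
            (
                f"PySem.List.sorted {lint(xs)} (fun x => x) true",
                "lint",
                sorted(xs, reverse=True),
            )
        )
        cases.append(
            (
                f"PySem.List.sorted {lint(xs)} (fun x => x % 3)",
                "lint",
                sorted(xs, key=lambda x: x % 3),
            )
        )
        cases.append(
            (
                f"PySem.List.sorted {lint(xs)} (fun x => x % 3) true",
                "lint",
                sorted(xs, key=lambda x: x % 3, reverse=True),
            )
        )
        cases.append(
            (
                f"PySem.List.min? {lint(xs)} (fun x => x % 3)",
                "oint",
                min(xs, key=lambda x: x % 3) if xs else None,
            )
        )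
        cases.append(
            (
                f"PySem.List.max? {lint(xs)} (fun x => x % 3)",
                "oint",
                max(xs, key=lambda x: x % 3) if xs else None,
            )
        )
        cases.append(
            (
                f"PySem.List.min? {lint(xs)} (fun x => x)",
                "oint",
                min(xs) if xs else None,
            )
        )
        # two-level (tuple) keys: Python compares tuples lexicographically
        cases.append(
            (
                f"PySem.List.sorted2 {lint(xs)} (fun x => x % 3) (fun x => -x)",
                "lint",
                sorted(xs, key=lambda x: (x % 3, -x)),
            )
        )
        cases.append(
            (
                f"PySem.List.sorted2 {lint(xs)} (fun x => x % 3) (fun x => -x) true",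
                "lint",
                sorted(xs, key=lambda x: (x % 3, -x), reverse=True),
            )
        )
        cases.append(
            (
                f"PySem.List.min2? {lint(xs)} (fun x => x % 3) (fun x => -x)",
                "oint",
                min(xs, key=lambda x: (x % 3, -x)) if xs else None,
            )
        )
        cases.append(
            (
                f"PySem.List.max2? {lint(xs)} (fun x => x % 3) (fun x => -x)",
                "oint",
                max(xs, key=lambda x: (x % 3, -x)) if xs else None,
            )
        )
        cases.append(
            (
                f"PySem.List.max? {lint(xs)} (fun x => x)",
                "oint",
                max(xs) if xs else None,
            )
        )
        for n in [-1, 0, 2]: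
            cases.append((f"PySem.List.pyRepeat {lint(xs)} ({n})", "lint", xs * n))
        cases.append((f"PySem.List.len {lint(xs)}", "int", len(xs)))
        # lemma pack 3: enumerate(xs, start) and the total item assignment pySetD (unchanged where Python raises)
        for st in [0, 1, -3]:
            cases.append(
                (
                    f"(PySem.List.enumerate {lint(xs)} ({st})).map (fun p => [p.1, p.2])",
                    "llnat",
                    [[i, x] for i, x in enumerate(xs, st)],
                )
            )
        for i in range(-8, 9):
            ys = setitem(xs, i, 99)
            cases.append(
                (
                    f"PySem.List.pySetD {lint(xs)} ({i}) 99",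
                    "lint",
                    xs if ys is None else ys,
                )
            )
    for a in range(-5, 6):
        for b in range(-5, 6):
            for st in [-3, -2, -1, 1, 2, 3]:
                cases.append(
                    (
                        f"PySem.List.pyRange ({a}) ({b}) ({st})",
                        "lint",
                        list(range(a, b, st)),
                    )
                )

    # ---- Set (lemma pack 3): Python set as the distinct elements in FIRST-INSERTION order. Set algebra is compared AS SETS
    # (through sorted); the element order is compared with dict.fromkeys only where PySem documents it (ofList/add/update).
    sets: list[list[int]] = [
        [],
        [3],
        [1, 2],
        [2, 1, 2],
        [5, 5, 5],
        [4, -1, 4, 0, -1, 7],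
    ]

    def lset(xs: list[int]) -> str:
        return "(PySem.Set.ofList " + lint(xs) + ")"

    def lsorted(e: str) -> str:
        return f"PySem.List.sorted ({e}) (fun x => x)"

    for xs in sets:
        cases.append((f"PySem.Set.ofList {lint(xs)}", "lint", list(dict.fromkeys(xs))))
        cases.append((f"PySem.List.dedup {lint(xs)}", "lint", list(dict.fromkeys(xs))))
        cases.append((f"PySem.Set.len {lset(xs)}", "int", len(set(xs))))
        cases.append(
            (
                f"(PySem.Dict.counter {lint(xs)}).items.map (fun p => [p.1, p.2])",
                "llnat",
                [[k, c] for k, c in Counter(xs).items()],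
            )
        )
        for v in [2, 5, -1]:
            cases.append((f"PySem.Set.contains {lset(xs)} ({v})", "bool", v in set(xs)))
            cases.append(
                (
                    f"PySem.Set.add {lset(xs)} ({v})",
                    "lint",
                    list(dict.fromkeys(xs + [v])),
                )
            )
            s2 = set(xs)
            s2.discard(v)
            cases.append(
                (lsorted(f"PySem.Set.discard {lset(xs)} ({v})"), "lint", sorted(s2))
            )
            cases.append(  # and the documented order: first-insertion order of the survivors
                (
                    f"PySem.Set.discard {lset(xs)} ({v})",
                    "lint",
                    [x for x in dict.fromkeys(xs) if x != v],
                )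
            )
            cases.append(
                (
                    f"(PySem.Set.remove? {lset(xs)} ({v})).map (fun s => {lsorted('s')})",
                    "olint",
                    sorted(s2) if v in set(xs) else None,
                )
            )
            cases.append(
                (f"(PySem.Dict.counter {lint(xs)}).getD ({v}) 0", "int", xs.count(v))
            )
        for ys in sets:
            cases.append(
                (
                    f"PySem.Set.update {lset(xs)} {lint(ys)}",
                    "lint",
                    list(dict.fromkeys(xs + ys)),
                )
            )
            cases.append(
                (
                    lsorted(f"PySem.Set.union {lset(xs)} {lset(ys)}"),
                    "lint",
                    sorted(set(xs) | set(ys)),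
                )
            )
            cases.append(
                (
                    lsorted(f"PySem.Set.inter {lset(xs)} {lset(ys)}"),
                    "lint",
                    sorted(set(xs) & set(ys)),
                )
            )
            cases.append(
                (
                    lsorted(f"PySem.Set.diff {lset(xs)} {lset(ys)}"),
                    "lint",
                    sorted(set(xs) - set(ys)),
                )
            )
            cases.append(
                (
                    f"PySem.Set.inter {lset(xs)} {lset(ys)}",
                    "lint",
                    [x for x in dict.fromkeys(xs) if x in set(ys)],
                )
            )
            cases.append(
                (
                    f"PySem.Set.diff {lset(xs)} {lset(ys)}",
                    "lint",
                    [x for x in dict.fromkeys(xs) if x not in set(ys)],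
                )
            )
            cases.append(
                (
                    lsorted(f"PySem.Set.symmDiff {lset(xs)} {lset(ys)}"),
                    "lint",
                    sorted(set(xs) ^ set(ys)),
                )
            )
            cases.append(
                (f"PySem.Set.equal {lset(xs)} {lset(ys)}", "bool", set(xs) == set(ys))
            )
            cases.append(
                (
                    f"PySem.Set.issubset {lset(xs)} {lset(ys)}",
                    "bool",
                    set(xs) <= set(ys),
                )
            )
            cases.append(
                (
                    f"PySem.Set.issuperset {lset(xs)} {lset(ys)}",
                    "bool",
                    set(xs) >= set(ys),
                )
            )
            cases.append(
                (
                    f"PySem.Set.isdisjoint {lset(xs)} {lset(ys)}",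
                    "bool",
                    set(xs).isdisjoint(set(ys)),
                )
            )

    # ---- Dict
    def dct(ps: list[tuple[int, int]]) -> str:
        return (
            "(PySem.Dict.ofList (["
            + ", ".join(f"({k}, {v})" for k, v in ps)
            + "] : List (Int × Int)))"
        )

    for ps in [
        [],
        [(1, 10)],
        [(1, 10), (2, 20), (1, 11)],
        [(3, 1), (2, 2), (3, 3), (1, 4), (2, 5)],
    ]:
        d: dict[int, int] = {}
        for k, v in ps:
            d[k] = v
        cases.append((f"{dct(ps)}.keys", "lint", list(d.keys())))
        cases.append((f"{dct(ps)}.values", "lint", list(d.values())))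
        for k in [1, 2, 3, 4]:
            cases.append((f"{dct(ps)}.get? ({k})", "oint", d.get(k)))
            d2 = dict(d)
            d2[k] = 77
            cases.append((f"({dct(ps)}.insert ({k}) 77).keys", "lint", list(d2.keys())))
            cases.append(
                (f"({dct(ps)}.insert ({k}) 77).values", "lint", list(d2.values()))
            )
            d3 = dict(d)
            d3.pop(k, None)
            cases.append((f"({dct(ps)}.erase ({k})).keys", "lint", list(d3.keys())))
            d4 = dict(d)
            d4.setdefault(k, 55)
            cases.append(
                (f"({dct(ps)}.setdefault ({k}) 55).values", "lint", list(d4.values()))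
            )
            d5 = dict(d)
            d5[k] = d5.get(k, 0) + 1
            cases.append(
                (
                    f"({dct(ps)}.modify ({k}) 0 (fun v => v + 1)).values",
                    "lint",
                    list(d5.values()),
                )
            )
    # ---- Str
    cases.append(
        (
            "((List.range 0x3100).filter (fun n => PySem.Str.isspace (Char.ofNat n)))",
            "lnat",
            [c for c in range(0x3100) if chr(c).isspace()],
        )
    )
    cases.append(
        (
            "((List.range 128).filter (fun n => PySem.Str.isdigit (Char.ofNat n)))",
            "lnat",
            [c for c in range(128) if chr(c).isdigit()],
        )
    )
    cases.append(
        (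
            "((List.range 128).filter (fun n => PySem.Str.isalpha (Char.ofNat n)))",
            "lnat",
            [c for c in range(128) if chr(c).isalpha()],
        )
    )
    cases.append(
        (
            "((List.range 128).filter (fun n => PySem.Str.isalnum (Char.ofNat n)))",
            "lnat",
            [c for c in range(128) if chr(c).isalnum()],
        )
    )
    strs = [
        "",
        "abc",
        "  a b  ",
        "\ta\x1cb\x85c ",
        "A,b,,C",
        "line1\nline2\r\nline3\rend",
        "x\x0by\x0cz\n",
        "Hello World",
        "aaa",
        "abab",
        " \u2028q\u00a0",
        "MiXeD 123",
        "tab\tsep",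
        "trailing\n",
        "\n\n",
        "a--b--",
        "--",
    ]

    def cps(t: str) -> list[int]:
        return [ord(c) for c in t]

    for s in strs:
        ls = f"({leanstr(s)})"
        cases.append(
            (f"(PySem.Str.strip {ls}).toList.map Char.toNat", "lnat", cps(s.strip()))
        )
        cases.append(
            (f"(PySem.Str.lstrip {ls}).toList.map Char.toNat", "lnat", cps(s.lstrip()))
        )
        cases.append(
            (f"(PySem.Str.rstrip {ls}).toList.map Char.toNat", "lnat", cps(s.rstrip()))
        )
        cases.append(
            (
                f'(PySem.Str.stripChars {ls} "-a ").toList.map Char.toNat',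
                "lnat",
                cps(s.strip("-a ")),
            )
        )
        cases.append(
            (
                f"(PySem.Str.split₀ {ls}).map (fun t => t.toList.map Char.toNat)",
                "llnat",
                [cps(t) for t in s.split()],
            )
        )
        cases.append(
            (
                f"(PySem.Str.splitlines {ls}).map (fun t => t.toList.map Char.toNat)",
                "llnat",
                [cps(t) for t in s.splitlines()],
            )
        )
        for sep in [",", "--", "ab", " "]:
            lsep = leanstr(sep)
            cases.append(
                (
                    f"((PySem.Str.split? {ls} {lsep}).getD []).map (fun t => t.toList.map Char.toNat)",
                    "llnat",
                    [cps(t) for t in s.split(sep)],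
                )
            )
            cases.append((f"PySem.Str.find {ls} {lsep}", "int", s.find(sep)))
            cases.append((f"PySem.Str.isIn {lsep} {ls}", "bool", sep in s))
            cases.append((f"PySem.Str.count {ls} {lsep}", "int", s.count(sep)))
            cases.append(
                (f"PySem.Str.startswith {ls} {lsep}", "bool", s.startswith(sep))
            )
            cases.append((f"PySem.Str.endswith {ls} {lsep}", "bool", s.endswith(sep)))
            cases.append(
                (
                    f'(PySem.Str.replace {ls} {lsep} "<>").toList.map Char.toNat',
                    "lnat",
                    cps(s.replace(sep, "<>")),
                )
            )
        cases.append((f'PySem.Str.split? {ls} ""', "none?", None))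
        cases.append((f'PySem.Str.find {ls} ""', "int", s.find("")))
        cases.append((f'PySem.Str.count {ls} ""', "int", s.count("")))
        cases.append(
            (
                f'(PySem.Str.replace {ls} "" "-").toList.map Char.toNat',
                "lnat",
                cps(s.replace("", "-")),
            )
        )
        cases.append(
            (f"(PySem.Str.lower {ls}).toList.map Char.toNat", "lnat", cps(s.lower()))
        )
        cases.append(
            (f"(PySem.Str.upper {ls}).toList.map Char.toNat", "lnat", cps(s.upper()))
        )
        cases.append((f"PySem.Str.strIsdigit {ls}", "bool", s.isdigit()))
        cases.append((f"PySem.Str.strIsspace {ls}", "bool", s.isspace()))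
        cases.append(
            (
                f'(PySem.Str.join ", " (PySem.Str.split₀ {ls})).toList.map Char.toNat',
                "lnat",
                cps(", ".join(s.split())),
            )
        )
        cases.append((f"PySem.Str.len {ls}", "int", len(s)))
        cases.append(
            (f"(PySem.Chars.upper {ls}.toList).map Char.toNat", "lnat", cps(s.upper()))
        )
        for i in [-3, -1, 0, 1, 5]:
            ch = getitem(s, i)
            cases.append(
                (
                    f"(PySem.Str.pyGet? {ls} ({i})).map Char.toNat",
                    "onat",
                    None if ch is None else ord(ch),
                )
            )
        cases.append(
            (
                f"(PySem.Str.slice {ls} (some 1) (some (-1))).toList.map Char.toNat",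
                "lnat",
                cps(s[1:-1]),
            )
        )
        cases.append(
            (
                f'((PySem.Str.slice? {ls} none none (-1)).getD "").toList.map Char.toNat',
                "lnat",
                cps(s[::-1]),
            )
        )
    _pack5_cases(cases, lists, strs)
    _pack6_cases(cases, lists)
    return cases


def _pack5_cases(
    cases: list[tuple[str, str, object]], lists: list[list[int]], strs: list[str]
) -> None:
    """Pack 5 primitives: int(s, base), bit_length/bit_count (+ core Lean's <<< >>> Int.not as Python's << >> ~),
    itertools.combinations, str.find/rfind with bounds, str.split with maxsplit, str < str."""

    def cps(t: str) -> list[int]: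
        return [ord(c) for c in t]

    # pack 5: int(s, base) — base 0 / 2..36, prefixes, underscores, bad bases
    for s in [
        " 12 ",
        "+5",
        "-0",
        "1_000",
        "_1",
        "1__0",
        "12_",
        "",
        " ",
        "0x10",
        "1 2",
        "\t-3\n",
        "007",
        "-",
        "+",
        "4_2_0",
        "0",
        "0b101",
        "0B1_01",
        "-0b101",
        "0b",
        "0b_1",
        "0b__1",
        "0b_",
        "0o17",
        "0O7_7",
        "0x1f",
        "0XfF",
        "0x_f",
        "0x",
        "ff",
        "FF",
        "z",
        "Zz",
        "0_x1",
        "010",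
        "00",
        "0_0",
        "0_",
        "1_2",
        " -0x1A ",
        "0b2",
        "0o8",
        "0xg",
        "19",
        "1a",
        "\x1c5",
        "12\x0b",
        "\u0663",
        "a_b",
        "7_",
        "+0x0",
        "-0o0_0",
        "0b1 ",
        " 0o",
        "1\t2",
        "9" * 30,
        "-" + "f" * 20,
        "1e3",
        "12.0",
    ]:
        for b in [0, 2, 8, 10, 16, 36, 1, 37, -2, 11]:
            try:
                expb = None if any(ord(c) > 127 for c in s) else int(s, b)
            except ValueError:
                expb = None
            cases.append((f"PySem.Int.ofStrBase? {leanstr(s)} ({b})", "oint", expb))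
    # pack 5: int.bit_length() / bit_count() (|n| on negatives); core Lean's <<< / >>> / Int.not on Int are Python's << / >> / ~
    for n in [
        *range(-20, 21),
        255,
        256,
        1023,
        1024,
        -1025,
        2**40,
        -(2**40) + 1,
        10**18 + 3,
    ]:
        cases.append((f"PySem.Int.bitLength ({n})", "int", n.bit_length()))
        cases.append((f"PySem.Int.bitCount ({n})", "int", n.bit_count()))
    # pack 6: Python & | ^ (two's complement, negatives included)
    bw = [*range(-4, 5), 255, -256, 2**40 + 5, -(2**40) - 5, -12345]
    for a in bw:
        for b in bw:
            cases.append((f"PySem.Int.band ({a}) ({b})", "int", a & b))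
            cases.append((f"PySem.Int.bor ({a}) ({b})", "int", a | b))
            cases.append((f"PySem.Int.bxor ({a}) ({b})", "int", a ^ b))
    for a in [-13, -1, 0, 1, 6, 255, -256, 12345]:
        cases.append((f"Int.not ({a})", "int", ~a))
        for k in [0, 1, 2, 5, 9]:
            cases.append((f"(({a}) : Int) <<< ({k} : Nat)", "int", a << k))
            cases.append((f"(({a}) : Int) >>> ({k} : Nat)", "int", a >> k))
    # pack 5: itertools.combinations in CPython's index-lexicographic order (duplicates are distinct positions)
    for xs in lists:
        for r in range(0, 6):
            cases.append(
                (
                    f"PySem.List.combinations {lint(xs)} {r}",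
                    "llnat",
                    [list(c) for c in itertools.combinations(xs, r)],
                )
            )

    for s in strs:
        ls = f"({leanstr(s)})"
        # pack 5: s.find(sub, start[, end]) with slice-style bounds; s.split(sep, maxsplit); s.split(None, maxsplit)
        for sep in [",", "ab", ""]:
            lsep = leanstr(sep)
            for st in [-4, -1, 2, 100]:
                cases.append(
                    (f"PySem.Str.findFrom {ls} {lsep} ({st})", "int", s.find(sep, st))
                )
                for e in [-2, 3]:
                    cases.append(
                        (
                            f"PySem.Str.findFrom {ls} {lsep} ({st}) (some ({e}))",
                            "int",
                            s.find(sep, st, e),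
                        )
                    )
        for sep in [",", "--", "ab", " "]:
            for m in [-1, 0, 1, 2]:
                cases.append(
                    (
                        f"((PySem.Str.splitMax? {ls} {leanstr(sep)} ({m})).getD []).map (fun t => t.toList.map Char.toNat)",
                        "llnat",
                        [cps(t) for t in s.split(sep, m)],
                    )
                )
        cases.append((f'PySem.Str.splitMax? {ls} "" 1', "none?", None))
        for sep in [",", "ab", ""]:
            lsep = leanstr(sep)
            cases.append((f"PySem.Str.rfind {ls} {lsep}", "int", s.rfind(sep)))
            for st in [-4, 2, 100]:
                for e in [-2, 100]:
                    cases.append(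
                        (
                            f"PySem.Str.rfindFrom {ls} {lsep} ({st}) (some ({e}))",
                            "int",
                            s.rfind(sep, st, e),
                        )
                    )
        for t in ["", "abc", "abd", "ab", "b", "A", " "]:
            cases.append(
                (
                    f"PySem.Chars.strLt {ls}.toList ({leanstr(t)} : String).toList",
                    "bool",
                    s < t,
                )
            )
            cases.append(
                (f"decide (({leanstr(s)} : String) < {leanstr(t)})", "bool", s < t)
            )
        for m in [-1, 0, 1, 3]:
            cases.append(
                (
                    f"(PySem.Str.split₀Max {ls} ({m})).map (fun t => t.toList.map Char.toNat)",
                    "llnat",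
                    [cps(t) for t in s.split(None, m)],
                )
            )


def _pack6_cases(cases: list[tuple[str, str, object]], lists: list[list[int]]) -> None:
    """Pack 6 primitives: pow(b, e, m) (e >= 0), max/min with default= (first maximal / minimal, also under a key),
    itertools.permutations(xs, r) in CPython's order, bisect_left / bisect_right (CPython's loop, so exact on unsorted lists too)."""
    for b in [*range(-7, 8), 12, -13, 100]:
        for e in [0, 1, 2, 3, 5, 10]:
            for m in [-97, -7, -3, -2, -1, 1, 2, 3, 7, 10, 97]:
                cases.append((f"PySem.Int.powMod ({b}) {e} ({m})", "int", pow(b, e, m)))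
    more = [[2, -2, 1, -1], [0, 3, -3, 3], [-5, -1, -9]]
    for xs in lists + more:
        for d in [0, -100]:
            cases.append(
                (
                    f"PySem.List.maxD {lint(xs)} (fun x => x) ({d})",
                    "int",
                    max(xs, default=d),
                )
            )
            cases.append(
                (
                    f"PySem.List.minD {lint(xs)} (fun x => x) ({d})",
                    "int",
                    min(xs, default=d),
                )
            )
        cases.append(
            (
                f"PySem.List.maxD {lint(xs)} (fun x => x.natAbs) (99)",
                "int",
                max(xs, key=abs, default=99),
            )
        )
        cases.append(
            (
                f"PySem.List.minD {lint(xs)} (fun x => x.natAbs) (99)",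
                "int",
                min(xs, key=abs, default=99),
            )
        )
    for xs in lists + [[1, 1, 2]]:
        for r in [0, 1, 2, 3, 4, len(xs), len(xs) + 1]:
            cases.append(
                (
                    f"PySem.List.permutations {lint(xs)} {r}",
                    "llnat",
                    [list(p) for p in itertools.permutations(xs, r)],
                )
            )
    for xs in (
        lists
        + [sorted(xs) for xs in lists]
        + [[1, 1, 1], [0, 2, 2, 2, 5, 5, 9], [-4, -4, 0, 7]]
    ):
        for x in [-5, -4, -2, 0, 1, 2, 3, 4, 5, 7, 9, 10]:
            cases.append(
                (
                    f"PySem.List.bisectLeft {lint(xs)} ({x})",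
                    "int",
                    bisect.bisect_left(xs, x),
                )
            )
            cases.append(
                (
                    f"PySem.List.bisectRight {lint(xs)} ({x})",
                    "int",
                    bisect.bisect_right(xs, x),
                )
            )


def parse(kind: str, txt: str) -> object:
    t = txt.strip()
    if t == "none":
        return None
    if t.startswith("some "):
        t = t[5:].strip()
    if (
        t.startswith("(")
        and t.endswith(")")
        and kind not in ("lint", "llnat", "lnat", "olint")
    ):
        t = t[1:-1]
    t = t.replace("true", "True").replace("false", "False")
    try:
        return ast.literal_eval(t)
    except (ValueError, SyntaxError):
        return ("UNPARSED", txt)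


def main() -> int:
    pdir = sys.argv[1]
    lean = sys.argv[2] if len(sys.argv) > 2 else "lean"
    cases = build_cases()
    lines = [
        "import PySemCore",
        "set_option maxRecDepth 100000",
    ]  # the core-only primitives module (PySem proper adds Mathlib-order lemmas on top)
    for idx, (expr, _kind, _exp) in enumerate(cases):
        lines.append(
            f'#eval IO.println ("CASE {idx} " ++ (repr ({expr})).pretty 100000000)'
        )
    with open(os.path.join(pdir, "Harness.lean"), "w", encoding="utf-8") as f:
        f.write("\n".join(lines) + "\n")
    p = subprocess.run(
        [lean, "Harness.lean"],
        cwd=pdir,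
        capture_output=True,
        text=True,
        timeout=int(
            os.environ.get("PV_PYSEM_HARNESS_TIMEOUT") or 1800
        ),  # one lean run over ≈9,700 #evals: ≈6 min on a quiet box, far longer on a loaded sandbox
        env={**os.environ, "LEAN_PATH": pdir},
        check=False,
    )
    out: dict[int, str] = {}
    for line in p.stdout.splitlines():
        if line.startswith("CASE "):
            _c, i, rest = line.split(" ", 2)
            out[int(i)] = rest
    errs = [ln for ln in p.stderr.splitlines() + p.stdout.splitlines() if "error" in ln]
    bad = []
    for idx, (expr, kind, exp) in enumerate(cases):
        if idx not in out:
            bad.append((idx, expr, exp, "<no output>"))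
            continue
        if parse(kind, out[idx]) != exp:
            bad.append((idx, expr, exp, out[idx]))
    for e in errs[:8]:
        print("LEANERR", e)
    for b in bad[:40]:
        print("MISMATCH", b)
    print(
        f"SUMMARY {len(cases)} cases, {len(out)} evaluated, {len(bad)} mismatches; lean rc={p.returncode}"
    )
    return 1 if bad or p.returncode else 0


if __name__ == "__main__":
    sys.exit(main())
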